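-- pv_equiv track=rewrite | github.com/pypi-data/pypi-mirror-297 | packages/distancia/distancia-0.0.48.tar.gz/distancia-0.0.48/distancia/imageDistance.py | compute_emd
-- ===== SOURCE A (Python) =====
-- def compute_emd(hist1, hist2):
--     """
--     Compute the Earth Mover's Distance (EMD) between two histograms.
--
--     :param hist1: List representing the first histogram (frequency values)
--     :param hist2: List representing the second histogram (frequency values)
--     :return: The Earth Mover's Distance between the two histograms
--     """
--     if len(hist1) != len(hist2):
--         raise ValueError("Histograms must have the same number of bins")
--
--     emd_value = 0
--     cumulative_flow = 0
--
--     # Calculate EMD by moving "dirt" from one bin to the next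
--     for i in range(len(hist1)):
--         # Difference between the two histograms at the current bin + cumulative flow
--         flow = hist1[i] + cumulative_flow - hist2[i]
--         emd_value += abs(flow)  # Accumulate the cost
--         cumulative_flow = flow  # Track the flow to the next bin
--
--     return emd_value
-- ===== SOURCE B (Python) =====
-- def compute_emd(hist1, hist2):
--     if len(hist1) != len(hist2):
--         raise ValueError("Histograms must have the same number of bins")
--     cdf1 = []
--     s = 0
--     for v in hist1:
--         s += v
--         cdf1.append(s)
--     cdf2 = []
--     s = 0
--     for v in hist2:
--         s += v
--         cdf2.append(s)
--     return sum(abs(a - b) for a, b in zip(cdf1, cdf2))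
-- ===== Notes on version B (the rewrite author's own statement) =====
-- stated objective: alternative
-- what changed: Two-phase CDF formulation: build both cumulative-sum lists first, then sum |cdf1[i]-cdf2[i]| over their zip, instead of A's fused single loop carrying a running flow variable.
import Mathlib
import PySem

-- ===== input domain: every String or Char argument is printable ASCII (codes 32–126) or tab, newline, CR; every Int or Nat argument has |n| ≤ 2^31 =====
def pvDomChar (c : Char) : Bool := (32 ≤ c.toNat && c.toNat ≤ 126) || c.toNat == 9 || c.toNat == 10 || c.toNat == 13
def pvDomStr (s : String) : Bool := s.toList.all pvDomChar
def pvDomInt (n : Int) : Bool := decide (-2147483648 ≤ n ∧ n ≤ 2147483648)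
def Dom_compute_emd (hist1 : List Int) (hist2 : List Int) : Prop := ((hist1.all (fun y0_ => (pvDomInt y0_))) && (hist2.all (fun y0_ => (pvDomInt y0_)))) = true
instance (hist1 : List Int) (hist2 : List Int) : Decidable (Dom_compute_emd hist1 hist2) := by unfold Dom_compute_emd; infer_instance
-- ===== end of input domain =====

-- B builds both cumulative-distribution lists first and sums |cdf1[i] - cdf2[i]| over their zip
-- (alternative decomposition of A's fused running-flow loop; same return value wherever A returns).

-- ===== PORT A =====
-- fused index loop carrying (emd_value, cumulative_flow); the 'else 0' branch is the ValueError, excluded by Pre_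
def compute_emd (hist1 : List Int) (hist2 : List Int) : Int :=
  if hist1.length ≠ hist2.length then 0
  else
    ((PySem.List.pyRange 0 (hist1.length : Int) 1).foldl
      (fun (st : Int × Int) i =>
        let flow := PySem.List.pyGetD hist1 i 0 + st.2 - PySem.List.pyGetD hist2 i 0
        (st.1 + |flow|, flow)) ((0 : Int), (0 : Int))).1

-- ===== PORT B =====
-- prefix-sum loop: cdf of a histogram (running sum s, appending each new total)
def pvCdf (s : Int) : List Int → List Int
  | [] => []
  | v :: vs => (s + v) :: pvCdf (s + v) vs

def compute_emd_alt (hist1 : List Int) (hist2 : List Int) : Int :=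
  if hist1.length ≠ hist2.length then 0
  else (((pvCdf 0 hist1).zip (pvCdf 0 hist2)).map (fun p => |p.1 - p.2|)).sum

-- ===== PRECONDITION & SPEC =====
-- Pre_ excludes exactly the length-mismatch inputs, on which Python A raises ValueError (B raises the same).
def Pre_compute_emd (hist1 : List Int) (hist2 : List Int) : Prop := hist1.length = hist2.length
instance (hist1 : List Int) (hist2 : List Int) : Decidable (Pre_compute_emd hist1 hist2) := by unfold Pre_compute_emd; infer_instance
def pvWitness_compute_emd : List Int × List Int := ([1, 2, 3], [0, 3, 1])

def Spec_compute_emd (hist1 : List Int) (hist2 : List Int) (out : Int) : Prop := out = compute_emd_alt hist1 hist2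
instance (hist1 : List Int) (hist2 : List Int) (out : Int) : Decidable (Spec_compute_emd hist1 hist2 out) := by unfold Spec_compute_emd; infer_instance

-- ===== CLAIM (what is proved, stated in full; the proofs are below) =====
def Claim_equal_compute_emd : Prop := ∀ (hist1 : List Int) (hist2 : List Int), Dom_compute_emd hist1 hist2 → Pre_compute_emd hist1 hist2 → Spec_compute_emd hist1 hist2 (compute_emd hist1 hist2)

-- ===== LEMMAS AND PROOFS =====

-- the running-flow recursion over the zipped histograms
def pvG (c : Int) : List (Int × Int) → Int
  | [] => 0
  | p :: l => |p.1 + c - p.2| + pvG (p.1 + c - p.2) l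

-- A's fold over the zip list computes pvG starting from its carry
theorem pvFold_eq_g (l : List (Int × Int)) : ∀ (e c : Int),
    (l.foldl (fun (st : Int × Int) p =>
        (st.1 + |p.1 + st.2 - p.2|, p.1 + st.2 - p.2)) (e, c)).1 = e + pvG c l := by
  induction l with
  | nil => intro e c; simp [pvG]
  | cons p l ih =>
      intro e c
      simp only [List.foldl_cons, pvG, ih]
      ring

-- B's zipped-CDF sum computes pvG of the difference of the initial carries
theorem pvCdf_sum_eq_g (xs : List Int) : ∀ (ys : List Int) (s t : Int),
    (((pvCdf s xs).zip (pvCdf t ys)).map (fun p => |p.1 - p.2|)).sum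
      = pvG (s - t) (xs.zip ys) := by
  induction xs with
  | nil => intro ys s t; simp [pvCdf, pvG]
  | cons x xs ih =>
      intro ys s t
      cases ys with
      | nil => simp [pvCdf, pvG]
      | cons y ys =>
          simp only [pvCdf, List.zip_cons_cons, List.map_cons, List.sum_cons, pvG, ih]
          have h1 : s + x - (t + y) = x + (s - t) - y := by ring
          rw [h1]

-- ===== VERDICT (by name: the statement is the Claim_ definition above) =====
theorem compute_emd_spec : Claim_equal_compute_emd := by
  intro hist1 hist2 _ hpre
  unfold Spec_compute_emd compute_emd compute_emd_alt
  have hlen : hist1.length = hist2.length := hpre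
  simp only [hlen, ne_eq, not_true_eq_false, if_false]
  -- replace the two indexings by one indexing into the zip list
  have hzlen : (hist1.zip hist2).length = hist2.length := by
    simp [List.length_zip, hlen]
  have hbody : (PySem.List.pyRange 0 (hist2.length : Int) 1).foldl
      (fun (st : Int × Int) i =>
        (st.1 + |PySem.List.pyGetD hist1 i 0 + st.2 - PySem.List.pyGetD hist2 i 0|,
          PySem.List.pyGetD hist1 i 0 + st.2 - PySem.List.pyGetD hist2 i 0))
      ((0 : Int), (0 : Int))
      = (PySem.List.pyRange 0 (hist2.length : Int) 1).foldl
      (fun (st : Int × Int) i =>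
        (st.1 + |(PySem.List.pyGetD (hist1.zip hist2) i ((0 : Int), (0 : Int))).1 + st.2
            - (PySem.List.pyGetD (hist1.zip hist2) i ((0 : Int), (0 : Int))).2|,
          (PySem.List.pyGetD (hist1.zip hist2) i ((0 : Int), (0 : Int))).1 + st.2
            - (PySem.List.pyGetD (hist1.zip hist2) i ((0 : Int), (0 : Int))).2))
      ((0 : Int), (0 : Int)) := by
    apply PySem.List.foldl_congr_mem
    intro acc i hi
    rw [PySem.List.mem_pyRange_one] at hi
    have h0 : (0 : Int) ≤ i := hi.1
    have h1i : i < (hist1.length : Int) := by rw [hlen]; exact hi.2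
    have h2i : i < (hist2.length : Int) := hi.2
    have hzi : i < ((hist1.zip hist2).length : Int) := by rw [hzlen]; exact hi.2
    rw [PySem.List.pyGetD_eq_getElem hist1 0 h0 h1i, PySem.List.pyGetD_eq_getElem hist2 0 h0 h2i,
        PySem.List.pyGetD_eq_getElem (hist1.zip hist2) ((0 : Int), (0 : Int)) h0 hzi]
    simp [List.getElem_zip]
  calc ((PySem.List.pyRange 0 (hist2.length : Int) 1).foldl
      (fun (st : Int × Int) i =>
        (st.1 + |PySem.List.pyGetD hist1 i 0 + st.2 - PySem.List.pyGetD hist2 i 0|,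
          PySem.List.pyGetD hist1 i 0 + st.2 - PySem.List.pyGetD hist2 i 0))
      ((0 : Int), (0 : Int))).1
      = ((hist1.zip hist2).foldl
          (fun (st : Int × Int) p => (st.1 + |p.1 + st.2 - p.2|, p.1 + st.2 - p.2))
          ((0 : Int), (0 : Int))).1 := by
        rw [hbody, ← hzlen]
        rw [PySem.List.foldl_pyRange_zero_pyGetD' (hist1.zip hist2) ((0 : Int), (0 : Int))
          (fun (st : Int × Int) p => (st.1 + |p.1 + st.2 - p.2|, p.1 + st.2 - p.2))
          ((0 : Int), (0 : Int))]
    _ = 0 + pvG 0 (hist1.zip hist2) := pvFold_eq_g _ 0 0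
    _ = (((pvCdf 0 hist1).zip (pvCdf 0 hist2)).map (fun p => |p.1 - p.2|)).sum := by
        rw [pvCdf_sum_eq_g hist1 hist2 0 0]; simp
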